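-- pv_equiv track=rewrite | github.com/tensara/problems | archive/rms-norm/def.py | get_extra_params
-- ===== SOURCE A (Python) =====
-- from typing import List, Dict, Tuple, Any
--
-- def get_extra_params(test_case: Dict[str, Any]) -> List[Any]:
--     """
--     Get extra parameters to pass to the CUDA solution.
--
--     Args:
--         test_case: The test case dictionary
--
--     Returns:
--         List containing batch_size, num_features, total_size, dims_size
--     """
--     shape = test_case["shape"]
--     batch_size = shape[0]
--     num_features = shape[1]
--
--     # Calculate total size and dims_size
--     total_size = 1
--     for dim in shape:
--         total_size *= dim
--
--     # Calculate size of dimensions after batch and features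
--     dims_size = 1
--     for i in range(2, len(shape)):
--         dims_size *= shape[i]
--
--     # If there are no extra dimensions (2D tensor), dims_size is 1
--     if len(shape) <= 2:
--         dims_size = 1
--
--     return [batch_size, num_features, total_size, dims_size]
-- ===== SOURCE B (Python) =====
-- def _prod(dims):
--     """Recursive right-fold product: empty list -> 1."""
--     if not dims:
--         return 1
--     return dims[0] * _prod(dims[1:])
--
--
-- def get_extra_params(test_case):
--     """
--     Get extra parameters to pass to the CUDA solution.
--
--     Destructures shape by unpacking (no indexing), computes dims_size by a
--     recursive right-fold over the trailing dims, and derives total_size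
--     arithmetically as batch_size * num_features * dims_size.
--     """
--     batch_size, num_features, *rest = test_case["shape"]
--     dims_size = _prod(rest)
--     return [batch_size, num_features, batch_size * num_features * dims_size, dims_size]
-- ===== Notes on version B (the rewrite author's own statement) =====
-- stated objective: alternative
-- what changed: B destructures shape by tuple unpacking instead of indexed access, computes dims_size by a recursive right-fold over only the trailing dims, and derives total_size arithmetically, replacing A's two iterative left-fold loops over the shape (and its range/index loop and len<=2 override) with a loop-free recursive decomposition.
import Mathlib
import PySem

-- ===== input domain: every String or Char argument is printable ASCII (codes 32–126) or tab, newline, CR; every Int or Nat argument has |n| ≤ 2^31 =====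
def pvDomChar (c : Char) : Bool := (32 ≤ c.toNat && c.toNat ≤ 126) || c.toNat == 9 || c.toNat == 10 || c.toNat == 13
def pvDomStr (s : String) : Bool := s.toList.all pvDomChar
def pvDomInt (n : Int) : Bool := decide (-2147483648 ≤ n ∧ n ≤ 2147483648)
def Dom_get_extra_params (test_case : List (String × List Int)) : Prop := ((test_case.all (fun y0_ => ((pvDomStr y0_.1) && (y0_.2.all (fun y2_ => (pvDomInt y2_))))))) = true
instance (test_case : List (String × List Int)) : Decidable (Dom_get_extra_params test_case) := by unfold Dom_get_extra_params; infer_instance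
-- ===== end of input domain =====

-- B destructures shape by unpacking, computes dims_size by a recursive right-fold
-- over the trailing dims only, and derives total_size arithmetically — no iterative
-- loops, no indexing, no len<=2 override (objective: alternative decomposition).

-- ===== PORT A =====
def get_extra_params (test_case : List (String × List Int)) : List Int :=
  let shape := (test_case.lookup "shape").getD []
  let batch_size := PySem.List.pyGetD shape 0 0
  let num_features := PySem.List.pyGetD shape 1 0
  let total_size := shape.foldl (fun acc dim => acc * dim) 1
  let dims_size := (PySem.List.pyRange 2 (shape.length : Int) 1).foldl
    (fun acc i => acc * PySem.List.pyGetD shape i 0) 1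
  let dims_size := if (shape.length : Int) ≤ 2 then 1 else dims_size
  [batch_size, num_features, total_size, dims_size]

-- ===== PORT B =====
-- recursive right-fold product (= Source B's _prod)
def pvProd : List Int → Int
  | [] => 1
  | d :: t => d * pvProd t

def get_extra_params_alt (test_case : List (String × List Int)) : List Int :=
  match (test_case.lookup "shape").getD [] with
  | batch_size :: num_features :: rest =>
      let dims_size := pvProd rest
      [batch_size, num_features, batch_size * num_features * dims_size, dims_size]
  | _ => []  -- unpacking raises in Python here (outside Pre_)

-- ===== PRECONDITION & SPEC =====
-- Pre_ excludes inputs on which A raises: a missing "shape" key (KeyError) or a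
-- shape of length < 2 (IndexError on shape[0]/shape[1]).
def Pre_get_extra_params (test_case : List (String × List Int)) : Prop :=
  2 ≤ ((test_case.lookup "shape").getD []).length
instance (test_case : List (String × List Int)) : Decidable (Pre_get_extra_params test_case) := by
  unfold Pre_get_extra_params; infer_instance

def pvWitness_get_extra_params : (List (String × List Int)) := [("shape", [2, 3, 4])]

def Spec_get_extra_params (test_case : List (String × List Int)) (out : List Int) : Prop := out = get_extra_params_alt test_case
instance (test_case : List (String × List Int)) (out : List Int) : Decidable (Spec_get_extra_params test_case out) := by unfold Spec_get_extra_params; infer_instance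

-- ===== CLAIM (what is proved, stated in full; the proofs are below) =====
def Claim_equal_get_extra_params : Prop := ∀ (test_case : List (String × List Int)), Dom_get_extra_params test_case → Pre_get_extra_params test_case → Spec_get_extra_params test_case (get_extra_params test_case)

-- ===== LEMMAS AND PROOFS =====

-- A left product fold with accumulator x equals x times the recursive right-fold product.
theorem pv_foldl_eq_prod (l : List Int) (x : Int) :
    l.foldl (fun acc dim => acc * dim) x = x * pvProd l := by
  induction l generalizing x with
  | nil => simp [pvProd]
  | cons a t ih =>
    simp only [List.foldl_cons, pvProd]
    rw [ih (x * a)]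
    ring

-- The core equality over the extracted shape list (length ≥ 2).
theorem pv_main (a b : Int) (rest : List Int) :
    [PySem.List.pyGetD (a :: b :: rest) 0 0, PySem.List.pyGetD (a :: b :: rest) 1 0,
     (a :: b :: rest).foldl (fun acc dim => acc * dim) 1,
     if ((a :: b :: rest).length : Int) ≤ 2 then 1 else
       (PySem.List.pyRange 2 ((a :: b :: rest).length : Int) 1).foldl
         (fun acc i => acc * PySem.List.pyGetD (a :: b :: rest) i 0) 1]
    = [a, b, a * b * pvProd rest, pvProd rest] := by
  have h0 : PySem.List.pyGetD (a :: b :: rest) 0 0 = a := by simp [pysem]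
  have h1 : PySem.List.pyGetD (a :: b :: rest) 1 0 = b := by simp [pysem]
  have hA : (PySem.List.pyRange 2 (((a :: b :: rest).length : Int)) 1).foldl
      (fun acc i => acc * PySem.List.pyGetD (a :: b :: rest) i 0) 1
      = rest.foldl (fun acc dim => acc * dim) 1 := by
    rw [PySem.List.foldl_pyRange_pyGetD' (a :: b :: rest) 0
      (fun acc dim => acc * dim) 1 (by norm_num)]
    simp
  have htot : (a :: b :: rest).foldl (fun acc dim => acc * dim) 1
      = a * b * pvProd rest := by
    simp only [List.foldl_cons]
    rw [pv_foldl_eq_prod]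
    ring
  rw [h0, h1, hA, htot, pv_foldl_eq_prod]
  by_cases hc : (((a :: b :: rest).length : Int)) ≤ 2
  · have hrest : rest = [] := by
      cases rest with
      | nil => rfl
      | cons x t => exfalso; simp at hc; omega
    subst hrest; simp [pvProd]
  · rw [if_neg hc]; ring_nf

-- ===== VERDICT (by name: the statement is the Claim_ definition above) =====
theorem get_extra_params_spec : Claim_equal_get_extra_params := by
  intro tc _ hpre
  unfold Pre_get_extra_params at hpre
  unfold Spec_get_extra_params get_extra_params get_extra_params_alt
  match h : (tc.lookup "shape").getD [] with
  | [] => rw [h] at hpre; simp at hpre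
  | [x] => rw [h] at hpre; simp at hpre
  | a :: b :: rest => exact pv_main a b rest
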